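-- pv_equiv track=rewrite | github.com/CallMeLuke94/final-year-project | findingsl4.py | coefficients
-- ===== SOURCE A (Python) =====
-- def coefficients(n):
--     result = []
--     for i in range(n+1):
--         for j in range(n-i+1):
--             for k in range(n-i-j+1):
--                 for l in range(n-i-j-k+1):
--                    if (i+j+k+l == n):
--                         result.append([l, k, j, i])
--     return result
-- ===== SOURCE B (Python) =====
-- def coefficients(n):
--     def comps(m, p):
--         if p == 1:
--             return [[m]]
--         return [c + [x] for x in range(m + 1) for c in comps(m - x, p - 1)]
--     return comps(n, 4)
-- ===== Notes on version B (the rewrite author's own statement) =====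
-- stated objective: alternative
-- what changed: replaces the four fixed nested loops with an equality filter by a recursive generator of compositions of m into p parts (called with p=4) that never enumerates the discarded innermost candidates
import Mathlib
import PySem

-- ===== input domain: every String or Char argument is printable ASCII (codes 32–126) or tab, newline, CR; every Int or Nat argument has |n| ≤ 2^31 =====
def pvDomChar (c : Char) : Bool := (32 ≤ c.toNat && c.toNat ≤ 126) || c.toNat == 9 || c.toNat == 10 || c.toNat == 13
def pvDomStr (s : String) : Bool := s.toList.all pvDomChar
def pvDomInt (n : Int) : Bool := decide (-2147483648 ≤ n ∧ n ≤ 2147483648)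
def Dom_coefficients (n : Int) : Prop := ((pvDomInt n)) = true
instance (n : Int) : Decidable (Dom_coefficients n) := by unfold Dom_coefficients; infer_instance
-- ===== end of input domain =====

-- B replaces A's four fixed nested loops (with an equality filter) by a recursive
-- generator of compositions of m into p parts, called with p = 4.

-- ===== PORT A =====
def coefficients (n : Int) : List (List Int) :=
  (PySem.List.pyRange 0 (n+1) 1).foldl (fun result i =>
    (PySem.List.pyRange 0 (n-i+1) 1).foldl (fun result j =>
      (PySem.List.pyRange 0 (n-i-j+1) 1).foldl (fun result k =>
        (PySem.List.pyRange 0 (n-i-j-k+1) 1).foldl (fun result l =>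
          if i+j+k+l == n then result ++ [[l, k, j, i]] else result) result) result) result) []

-- ===== PORT B =====
-- comps m p : the compositions of m into p nonnegative parts, last part varying slowest
def comps : Nat → Int → List (List Int)
  | 0, _ => []
  | 1, m => [[m]]
  | (p+2), m =>
      (PySem.List.pyRange 0 (m+1) 1).flatMap (fun x =>
        (comps (p+1) (m-x)).map (fun c => c ++ [x]))

def coefficients_alt (n : Int) : List (List Int) := comps 4 n

-- ===== PRECONDITION & SPEC =====
def Spec_coefficients (n : Int) (out : List (List Int)) : Prop := out = coefficients_alt n
instance (n : Int) (out : List (List Int)) : Decidable (Spec_coefficients n out) := by unfold Spec_coefficients; infer_instance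

-- ===== CLAIM =====
def Claim_equal_coefficients : Prop := ∀ (n : Int), Dom_coefficients n → Spec_coefficients n (coefficients n)

-- ===== LEMMAS AND PROOFS =====

-- A's innermost loop keeps exactly the one l with i+j+k+l = n, namely l = n-i-j-k (when ≥ 0).
theorem pv_filter_range (n i j k : Int) (hm : 0 ≤ n-i-j-k) :
    (PySem.List.pyRange 0 (n-i-j-k+1) 1).filter (fun l => i+j+k+l == n) = [n-i-j-k] := by
  rw [PySem.List.pyRange_one_succ_right hm, List.filter_append]
  have h1 : (PySem.List.pyRange 0 (n-i-j-k) 1).filter (fun l => i+j+k+l == n) = [] := by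
    rw [List.filter_eq_nil_iff]
    intro l hl
    have := (PySem.List.mem_pyRange_one).1 hl
    simp only [beq_iff_eq]
    omega
  have h2 : List.filter (fun l => i+j+k+l == n) [n-i-j-k] = [n-i-j-k] := by
    simp only [List.filter_cons, List.filter_nil]
    have : (i+j+k+(n-i-j-k) == n) = true := by simp only [beq_iff_eq]; omega
    rw [this]
    rfl
  rw [h1, h2]; rfl

theorem pv_inner (n i j k : Int) (hm : 0 ≤ n-i-j-k) (acc : List (List Int)) :
    (PySem.List.pyRange 0 (n-i-j-k+1) 1).foldl (fun result l =>
        if i+j+k+l == n then result ++ [[l, k, j, i]] else result) acc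
      = acc ++ [[n-i-j-k, k, j, i]] := by
  rw [PySem.List.foldl_append_if (fun l => i+j+k+l == n) (fun l => [l, k, j, i]),
      pv_filter_range n i j k hm]
  rfl

-- B's base cases unfolded
theorem pv_comps2 (m : Int) :
    comps 2 m = (PySem.List.pyRange 0 (m+1) 1).flatMap (fun k => [[m-k, k]]) := by
  simp [comps]

-- pushing the two map-appends inside the composition-of-2 generator gives A's k-entries
theorem pv_push (i j m : Int) (L : List Int) :
    ((L.flatMap (fun k => [[m-k, k]])).map (fun c => c ++ [j])).map (fun c => c ++ [i])
      = L.map (fun k => [m-k, k, j, i]) := by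
  induction L with
  | nil => rfl
  | cons a t ih => simp only [List.flatMap_cons, List.map_append, ih]; rfl

-- A's k-loop equals comps 2 (n-i-j) with j and i appended to each entry
theorem pv_levelK (n i j : Int) (acc : List (List Int)) :
    (PySem.List.pyRange 0 (n-i-j+1) 1).foldl (fun result k =>
        (PySem.List.pyRange 0 (n-i-j-k+1) 1).foldl (fun result l =>
          if i+j+k+l == n then result ++ [[l, k, j, i]] else result) result) acc
      = acc ++ ((comps 2 (n-i-j)).map (fun c => c ++ [j])).map (fun c => c ++ [i]) := by
  have h : (PySem.List.pyRange 0 (n-i-j+1) 1).foldl (fun result k =>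
        (PySem.List.pyRange 0 (n-i-j-k+1) 1).foldl (fun result l =>
          if i+j+k+l == n then result ++ [[l, k, j, i]] else result) result) acc
      = (PySem.List.pyRange 0 (n-i-j+1) 1).foldl (fun result k =>
          result ++ [[n-i-j-k, k, j, i]]) acc := by
    apply PySem.List.foldl_congr_mem
    intro acc' k hk
    have hk' := (PySem.List.mem_pyRange_one).1 hk
    exact pv_inner n i j k (by omega) acc'
  rw [h, PySem.List.foldl_append_singleton_eq_map, pv_comps2, pv_push]

-- A's j-loop equals comps 3 (n-i) with i appended to each entry
theorem pv_levelJ (n i : Int) (acc : List (List Int)) :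
    (PySem.List.pyRange 0 (n-i+1) 1).foldl (fun result j =>
      (PySem.List.pyRange 0 (n-i-j+1) 1).foldl (fun result k =>
        (PySem.List.pyRange 0 (n-i-j-k+1) 1).foldl (fun result l =>
          if i+j+k+l == n then result ++ [[l, k, j, i]] else result) result) result) acc
      = acc ++ (comps 3 (n-i)).map (fun c => c ++ [i]) := by
  have h : ∀ acc', (PySem.List.pyRange 0 (n-i+1) 1).foldl (fun result j =>
      (PySem.List.pyRange 0 (n-i-j+1) 1).foldl (fun result k =>
        (PySem.List.pyRange 0 (n-i-j-k+1) 1).foldl (fun result l =>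
          if i+j+k+l == n then result ++ [[l, k, j, i]] else result) result) result) acc'
      = (PySem.List.pyRange 0 (n-i+1) 1).foldl (fun result j =>
          result ++ ((comps 2 (n-i-j)).map (fun c => c ++ [j])).map (fun c => c ++ [i])) acc' := by
    intro acc'
    apply PySem.List.foldl_congr_mem
    intro acc'' j hj
    have hj' := (PySem.List.mem_pyRange_one).1 hj
    exact pv_levelK n i j acc''
  rw [h, PySem.List.foldl_append_eq_flatMap]
  show _ = acc ++ (comps (1+2) (n-i)).map (fun c => c ++ [i])
  rw [comps]
  simp only [List.flatMap_def, List.map_flatten, List.map_map]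
  congr 1
  congr 1
  apply List.map_congr_left
  intro j _
  show List.map ((fun c => c ++ [i]) ∘ fun c => c ++ [j]) (comps 2 (n-i-j)) = _
  simp [Function.comp, List.map_map]

-- ===== VERDICT =====
theorem coefficients_spec : Claim_equal_coefficients := by
  intro n _
  show coefficients n = coefficients_alt n
  unfold coefficients coefficients_alt
  have h : (PySem.List.pyRange 0 (n+1) 1).foldl (fun result i =>
    (PySem.List.pyRange 0 (n-i+1) 1).foldl (fun result j =>
      (PySem.List.pyRange 0 (n-i-j+1) 1).foldl (fun result k =>
        (PySem.List.pyRange 0 (n-i-j-k+1) 1).foldl (fun result l =>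
          if i+j+k+l == n then result ++ [[l, k, j, i]] else result) result) result) result) ([] : List (List Int))
      = (PySem.List.pyRange 0 (n+1) 1).foldl (fun result i =>
          result ++ (comps 3 (n-i)).map (fun c => c ++ [i])) [] := by
    apply PySem.List.foldl_congr_mem
    intro acc i hi
    have hi' := (PySem.List.mem_pyRange_one).1 hi
    exact pv_levelJ n i acc
  rw [h, PySem.List.foldl_append_eq_flatMap]
  show _ = comps (2+2) n
  rw [comps]
  rfl
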